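-- pv_equiv track=rewrite | github.com/ucam-department-of-psychiatry/crate | crateweb/core/dbfunc.py | translate_sql_qmark_to_percent
-- ===== SOURCE A (Python) =====
-- def escape_percent_for_python_dbapi(sql):
--     """
--     Escapes % by converting it to %%.
--     Use this for SQL within Python where % characters are used for argument
--     placeholders.
--     """
--     return sql.replace('%', '%%')
--
-- def translate_sql_qmark_to_percent(sql):
--     """
--     Translate SQL using ? placeholders to SQL using %s placeholders,
--     for engines like MySQL.
--     """
--     # Django always uses the '%s' placeholder, not ?
--     # ... https://docs.djangoproject.com/en/1.8/topics/db/sql/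
--     # I prefer ?, because % is used in LIKE clauses.
--     # 1. Escape % characters
--     sql = escape_percent_for_python_dbapi(sql)
--     # 2. Replace ? characters that are not within quotes with %s.
--     newsql = ""
--     in_quotes = False
--     for c in sql:
--         if c == "'":
--             in_quotes = not in_quotes
--         if c == '?' and not in_quotes:
--             newsql += '%s'
--         else:
--             newsql += c
--     return newsql
-- ===== SOURCE B (Python) =====
-- def translate_sql_qmark_to_percent(sql):
--     """
--     Translate SQL using ? placeholders to SQL using %s placeholders,
--     for engines like MySQL.
--     """
--     sql = sql.replace('%', '%%')
--     parts = sql.split("'")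
--     # even-indexed parts are outside single quotes
--     parts = [p.replace('?', '%s') if i % 2 == 0 else p
--              for i, p in enumerate(parts)]
--     return "'".join(parts)
-- ===== Notes on version B (the rewrite author's own statement) =====
-- stated objective: simpler
-- what changed: Replaced the per-character in_quotes state machine that appends to a growing string with a split-on-quote decomposition: split the %-escaped SQL at single quotes, replace ? by %s only in the even-indexed (outside-quote) segments, and join back with quotes.
import Mathlib
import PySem

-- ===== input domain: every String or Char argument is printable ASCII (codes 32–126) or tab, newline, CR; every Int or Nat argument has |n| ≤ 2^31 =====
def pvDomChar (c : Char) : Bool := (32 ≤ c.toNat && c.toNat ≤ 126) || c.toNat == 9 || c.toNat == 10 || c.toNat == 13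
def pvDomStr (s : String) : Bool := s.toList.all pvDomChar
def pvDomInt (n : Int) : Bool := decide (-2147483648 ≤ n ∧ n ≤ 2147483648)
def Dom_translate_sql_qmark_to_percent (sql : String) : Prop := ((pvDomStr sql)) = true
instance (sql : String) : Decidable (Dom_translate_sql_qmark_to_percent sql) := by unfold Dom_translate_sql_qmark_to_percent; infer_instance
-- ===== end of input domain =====

-- B replaces A's per-character in_quotes state machine by split-at-quotes /
-- replace-in-even-segments / join, for simplicity; return values proved equal.


-- ===== PORT A =====
-- A: escape '%' to '%%', then a character loop with an in_quotes flag,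
-- appending '%s' for each unquoted '?' and the character itself otherwise.
def translate_sql_qmark_to_percent (sql : String) : String :=
  let sql2 := PySem.Str.replace sql "%" "%%"
  let st := sql2.toList.foldl (fun (st : List Char × Bool) c =>
      let in_quotes := if c = '\'' then !st.2 else st.2
      if c = '?' && !in_quotes then (st.1 ++ ['%', 's'], in_quotes)
      else (st.1 ++ [c], in_quotes)) ([], false)
  String.ofList st.1

-- ===== PORT B =====
-- B: escape '%' to '%%', split at single quotes, replace '?' with '%s' in the
-- even-indexed (outside-quote) segments, join back with single quotes.
def translate_sql_qmark_to_percent_alt (sql : String) : String :=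
  let sql2 := PySem.Str.replace sql "%" "%%"
  let parts := PySem.Chars.splitOn sql2.toList ['\'']
  let parts2 := (PySem.List.enumerate parts 0).map (fun ip =>
      if PySem.Int.mod ip.1 2 = 0 then PySem.Chars.replace ip.2 ['?'] ['%', 's'] else ip.2)
  String.ofList (PySem.Chars.join ['\''] parts2)

-- ===== PRECONDITION & SPEC =====
def Spec_translate_sql_qmark_to_percent (sql : String) (out : String) : Prop := out = translate_sql_qmark_to_percent_alt sql
instance (sql : String) (out : String) : Decidable (Spec_translate_sql_qmark_to_percent sql out) := by unfold Spec_translate_sql_qmark_to_percent; infer_instance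

-- ===== CLAIM (what is proved, stated in full; the proofs are below) =====
def Claim_equal_translate_sql_qmark_to_percent : Prop := ∀ (sql : String), Dom_translate_sql_qmark_to_percent sql → Spec_translate_sql_qmark_to_percent sql (translate_sql_qmark_to_percent sql)

-- ===== LEMMAS AND PROOFS =====

-- simple recursive form of '?' → '%s' replacement
def pvRepl : List Char → List Char
  | [] => []
  | c :: t => if c = '?' then '%' :: 's' :: pvRepl t else c :: pvRepl t

-- simple recursive form of splitting at '\''
def pvSplitQ : List Char → List (List Char)
  | [] => [[]]
  | c :: t =>
    if c = '\'' then [] :: pvSplitQ t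
    else match pvSplitQ t with
      | [] => [[c]]
      | x :: xs => (c :: x) :: xs

def pvConsHd (p : List Char) : List (List Char) → List (List Char)
  | [] => [p]
  | x :: xs => (p ++ x) :: xs

-- A's state machine, recursively (b = in_quotes)
def pvSM : Bool → List Char → List Char
  | _, [] => []
  | b, c :: t =>
    let b' := if c = '\'' then !b else b
    if c = '?' && !b' then '%' :: 's' :: pvSM b' t else c :: pvSM b' t

-- alternating replacement (r = replace the head segment?)
def pvAlt : Bool → List (List Char) → List (List Char)
  | _, [] => []
  | r, p :: ps => (if r then pvRepl p else p) :: pvAlt (!r) ps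

-- recursive join with a single quote
def pvJoin : List (List Char) → List Char
  | [] => []
  | [p] => p
  | p :: ps => p ++ '\'' :: pvJoin ps

lemma pvSplitQ_ne_nil (l : List Char) : pvSplitQ l ≠ [] := by
  cases l with
  | nil => simp [pvSplitQ]
  | cons c t =>
    simp only [pvSplitQ]
    split
    · simp
    · cases h : pvSplitQ t <;> simp

lemma pvJoin_cons_head (z : Char) (p : List Char) (ps : List (List Char)) :
    pvJoin ((z :: p) :: ps) = z :: pvJoin (p :: ps) := by
  cases ps <;> simp [pvJoin]

lemma pvReplace_go_eq :
    ∀ (l : List Char) (fuel : Nat) (acc : List Char), l.length ≤ fuel →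
      PySem.Chars.replace.go ['?'] ['%', 's'] fuel l acc = acc.reverse ++ pvRepl l := by
  intro l
  induction l with
  | nil => intro fuel acc _; cases fuel <;> simp [PySem.Chars.replace.go, pvRepl]
  | cons c t ih =>
    intro fuel acc h
    cases fuel with
    | zero => simp at h
    | succ f =>
      simp only [PySem.Chars.replace.go]
      by_cases hc : c = '?'
      · subst hc
        simp only [List.length_cons] at h
        rw [if_pos (by simp [List.isPrefixOf])]
        simp only [List.length_cons, List.length_nil, List.drop_succ_cons, List.drop_zero]
        rw [ih f _ (by omega)]
        simp [pvRepl]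
      · rw [if_neg (by simp [List.isPrefixOf]; intro hh; exact hc hh.symm)]
        rw [ih f _ (by simpa using Nat.le_of_succ_le_succ h)]
        simp [pvRepl, hc]

lemma pvReplace_eq (l : List Char) :
    PySem.Chars.replace l ['?'] ['%', 's'] = pvRepl l := by
  simp only [PySem.Chars.replace]
  rw [if_neg (by simp)]
  simpa using pvReplace_go_eq l l.length [] (le_refl _)

lemma pvSplit_go_eq :
    ∀ (l : List Char) (fuel : Nat) (cur : List Char) (acc : List (List Char)), l.length ≤ fuel →
      PySem.Chars.splitOn.go ['\''] fuel l cur acc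
        = acc.reverse ++ pvConsHd cur.reverse (pvSplitQ l) := by
  intro l
  induction l with
  | nil =>
    intro fuel cur acc _
    cases fuel <;> simp [PySem.Chars.splitOn.go, pvSplitQ, pvConsHd]
  | cons c t ih =>
    intro fuel cur acc h
    cases fuel with
    | zero => simp at h
    | succ f =>
      simp only [PySem.Chars.splitOn.go]
      by_cases hc : c = '\''
      · subst hc
        rw [if_pos (by simp [List.isPrefixOf])]
        simp only [List.length_cons, List.length_nil, List.drop_succ_cons, List.drop_zero]
        rw [ih f _ _ (by simpa using Nat.le_of_succ_le_succ h)]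
        cases hs : pvSplitQ t with
        | nil => exact absurd hs (pvSplitQ_ne_nil t)
        | cons x xs => simp [pvSplitQ, pvConsHd, hs]
      · rw [if_neg (by simp [List.isPrefixOf]; intro hh; exact hc hh.symm)]
        rw [ih f _ _ (by simpa using Nat.le_of_succ_le_succ h)]
        simp only [pvSplitQ, if_neg hc, List.reverse_cons]
        cases hs : pvSplitQ t with
        | nil => exact absurd hs (pvSplitQ_ne_nil t)
        | cons x xs => simp [pvConsHd]

lemma pvSplitOn_eq (l : List Char) :
    PySem.Chars.splitOn l ['\''] = pvSplitQ l := by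
  simp only [PySem.Chars.splitOn]
  rw [pvSplit_go_eq l (l.length + 1) [] [] (by omega)]
  simp only [List.reverse_nil, List.nil_append]
  cases hs : pvSplitQ l with
  | nil => exact absurd hs (pvSplitQ_ne_nil l)
  | cons x xs => simp [pvConsHd]

lemma pvJoin_eq (ps : List (List Char)) :
    PySem.Chars.join ['\''] ps = pvJoin ps := by
  induction ps with
  | nil => simp [pvJoin, PySem.Chars.join_nil]
  | cons p ps ih =>
    cases ps with
    | nil => simp [pvJoin, PySem.Chars.join_singleton]
    | cons q qs =>
      rw [PySem.Chars.join_cons_cons, ih]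
      simp [pvJoin]

lemma pvEnum_map_eq (ps : List (List Char)) :
    ∀ (s : Int), 0 ≤ s →
      (PySem.List.enumerate ps s).map (fun ip =>
          if PySem.Int.mod ip.1 2 = 0 then pvRepl ip.2 else ip.2)
        = pvAlt (decide (PySem.Int.mod s 2 = 0)) ps := by
  induction ps with
  | nil => intro s _; simp [pvAlt, PySem.List.enumerate_nil]
  | cons p ps ih =>
    intro s hs
    rw [PySem.List.enumerate_cons, List.map_cons, ih (s + 1) (by omega)]
    have hm : PySem.Int.mod s 2 = s % 2 := PySem.Int.mod_eq_emod_of_pos (by omega)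
    have hm1 : PySem.Int.mod (s + 1) 2 = (s + 1) % 2 := PySem.Int.mod_eq_emod_of_pos (by omega)
    simp only [pvAlt, hm, hm1]
    by_cases h : s % 2 = 0
    · have : (s + 1) % 2 = 1 := by omega
      simp [h, this]
    · have h2 : s % 2 = 1 := by omega
      have : (s + 1) % 2 = 0 := by omega
      simp [h2, this]

-- core: joining the alternating replacement of the split = A's state machine
lemma pvKey (l : List Char) :
    pvJoin (pvAlt true (pvSplitQ l)) = pvSM false l
      ∧ pvJoin (pvAlt false (pvSplitQ l)) = pvSM true l := by
  induction l with
  | nil => simp [pvSplitQ, pvAlt, pvJoin, pvSM, pvRepl]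
  | cons c t ih =>
    obtain ⟨ih1, ih2⟩ := ih
    by_cases hc : c = '\''
    · subst hc
      cases hs : pvSplitQ t with
      | nil => exact absurd hs (pvSplitQ_ne_nil t)
      | cons x xs =>
        rw [hs] at ih1 ih2
        have ih1' : pvJoin (pvRepl x :: pvAlt false xs) = pvSM false t := by
          simpa [pvAlt] using ih1
        have ih2' : pvJoin (x :: pvAlt true xs) = pvSM true t := by
          simpa [pvAlt] using ih2
        have e1 : pvSplitQ ('\'' :: t) = [] :: x :: xs := by simp [pvSplitQ, hs]
        constructor
        · rw [e1]
          have e2 : pvAlt true ([] :: x :: xs) = [] :: x :: pvAlt true xs := by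
            simp [pvAlt, pvRepl]
          rw [e2]
          have e3 : pvJoin ([] :: x :: pvAlt true xs) = '\'' :: pvJoin (x :: pvAlt true xs) := by
            simp [pvJoin]
          rw [e3, ih2']
          simp [pvSM]
        · rw [e1]
          have e2 : pvAlt false ([] :: x :: xs) = [] :: pvRepl x :: pvAlt false xs := by
            simp [pvAlt]
          rw [e2]
          have e3 : pvJoin ([] :: pvRepl x :: pvAlt false xs)
              = '\'' :: pvJoin (pvRepl x :: pvAlt false xs) := by
            simp [pvJoin]
          rw [e3, ih1']
          simp [pvSM]
    · cases hs : pvSplitQ t with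
      | nil => exact absurd hs (pvSplitQ_ne_nil t)
      | cons x xs =>
        rw [hs] at ih1 ih2
        have ih1' : pvJoin (pvRepl x :: pvAlt false xs) = pvSM false t := by
          simpa [pvAlt] using ih1
        have ih2' : pvJoin (x :: pvAlt true xs) = pvSM true t := by
          simpa [pvAlt] using ih2
        have e1 : pvSplitQ (c :: t) = (c :: x) :: xs := by simp [pvSplitQ, hc, hs]
        constructor
        · rw [e1]
          have e2 : pvAlt true ((c :: x) :: xs) = pvRepl (c :: x) :: pvAlt false xs := by
            simp [pvAlt]
          rw [e2]
          by_cases hq : c = '?'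
          · subst hq
            have e3 : pvRepl ('?' :: x) = '%' :: 's' :: pvRepl x := by simp [pvRepl]
            rw [e3, pvJoin_cons_head, pvJoin_cons_head, ih1']
            simp [pvSM, hc]
          · have e3 : pvRepl (c :: x) = c :: pvRepl x := by simp [pvRepl, hq]
            rw [e3, pvJoin_cons_head, ih1']
            simp [pvSM, hc, hq]
        · rw [e1]
          have e2 : pvAlt false ((c :: x) :: xs) = (c :: x) :: pvAlt true xs := by
            simp [pvAlt]
          rw [e2, pvJoin_cons_head, ih2']
          simp [pvSM, hc]

-- A's foldl carries (output, in_quotes); its output component is pvSM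
lemma pvFoldl_eq (l : List Char) :
    ∀ (acc : List Char) (b : Bool),
      (l.foldl (fun (st : List Char × Bool) c =>
        let in_quotes := if c = '\'' then !st.2 else st.2
        if c = '?' && !in_quotes then (st.1 ++ ['%', 's'], in_quotes)
        else (st.1 ++ [c], in_quotes)) (acc, b)).1 = acc ++ pvSM b l := by
  induction l with
  | nil => intro acc b; simp [pvSM]
  | cons c t ih =>
    intro acc b
    simp only [List.foldl_cons, pvSM]
    by_cases hcond : (decide (c = '?') && !(if c = '\'' then !b else b)) = true
    · rw [if_pos hcond, if_pos hcond, ih]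
      simp
    · rw [if_neg hcond, if_neg hcond, ih]
      simp

-- combining the bridges: A's loop output = B's split/replace/join output
lemma pvMain (l : List Char) :
    (l.foldl (fun (st : List Char × Bool) c =>
        let in_quotes := if c = '\'' then !st.2 else st.2
        if c = '?' && !in_quotes then (st.1 ++ ['%', 's'], in_quotes)
        else (st.1 ++ [c], in_quotes)) ([], false)).1
      = PySem.Chars.join ['\'']
          ((PySem.List.enumerate (PySem.Chars.splitOn l ['\'']) 0).map (fun ip =>
            if PySem.Int.mod ip.1 2 = 0 then PySem.Chars.replace ip.2 ['?'] ['%', 's'] else ip.2)) := by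
  rw [pvFoldl_eq l [] false, List.nil_append, pvSplitOn_eq]
  have h1 : (PySem.List.enumerate (pvSplitQ l) 0).map (fun ip =>
      if PySem.Int.mod ip.1 2 = 0 then PySem.Chars.replace ip.2 ['?'] ['%', 's'] else ip.2)
      = (PySem.List.enumerate (pvSplitQ l) 0).map (fun ip =>
      if PySem.Int.mod ip.1 2 = 0 then pvRepl ip.2 else ip.2) := by
    apply List.map_congr_left
    intro ip _
    simp [pvReplace_eq]
  rw [h1]
  have h2 := pvEnum_map_eq (pvSplitQ l) 0 (le_refl 0)
  simp only [show PySem.Int.mod 0 2 = 0 from rfl, decide_true] at h2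
  rw [h2, pvJoin_eq]
  exact (pvKey l).1.symm

-- ===== VERDICT (by name: the statement is the Claim_ definition above) =====
theorem translate_sql_qmark_to_percent_spec : Claim_equal_translate_sql_qmark_to_percent := by
  intro sql _
  unfold Spec_translate_sql_qmark_to_percent
  unfold translate_sql_qmark_to_percent translate_sql_qmark_to_percent_alt
  exact congrArg String.ofList (pvMain (PySem.Str.replace sql "%" "%%").toList)
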